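-- pv_equiv track=rewrite | github.com/poteznyziomek/VBAMatrices | dimensions.py | are_compatible
-- ===== SOURCE A (Python) =====
-- def are_compatible(fam):
--     """Check whether matrices in fam are compatible for mul.
--     """
--     mat_dims = []
--     for m in fam:
--         mat_dims.append((len(m), len(m[0])))
--
--     for i in range(len(mat_dims) - 1):
--         if mat_dims[i][1] != mat_dims[i+1][0]:
--             return False
--     return True
-- ===== SOURCE B (Python) =====
-- def are_compatible(fam):
--     """Check whether matrices in fam are compatible for mul."""
--     prev_cols = None
--     for m in fam:
--         if prev_cols is not None and prev_cols != len(m):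
--             return False
--         prev_cols = len(m[0])
--     return True
-- ===== Notes on version B (the rewrite author's own statement) =====
-- stated objective: simpler
-- what changed: Replaces A's two passes (build a dims list, then scan adjacent index pairs) with one fused traversal carrying only the previous matrix's column count in an accumulator; no intermediate list.
import Mathlib
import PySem

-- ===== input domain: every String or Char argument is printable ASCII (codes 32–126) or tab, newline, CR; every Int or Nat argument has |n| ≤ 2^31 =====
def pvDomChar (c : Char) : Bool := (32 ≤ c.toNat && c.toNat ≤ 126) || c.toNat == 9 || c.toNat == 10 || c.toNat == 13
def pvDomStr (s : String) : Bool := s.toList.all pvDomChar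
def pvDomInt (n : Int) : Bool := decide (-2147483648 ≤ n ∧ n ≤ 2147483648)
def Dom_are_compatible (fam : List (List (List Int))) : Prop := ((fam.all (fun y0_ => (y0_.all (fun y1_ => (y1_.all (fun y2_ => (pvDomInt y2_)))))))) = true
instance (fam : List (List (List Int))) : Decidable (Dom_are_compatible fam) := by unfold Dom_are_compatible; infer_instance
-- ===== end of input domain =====

-- B fuses A's two passes (dims list + adjacent-pair scan) into one traversal carrying
-- only the previous matrix's column count; same return value on all inputs in Pre_.

-- ===== PORT A =====
-- mat_dims.append((len(m), len(m[0]))): m[0] is pyGet?; inside Pre_ every m is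
-- nonempty so getD [] is never the default (Python raises IndexError on m = []).
def pvDimsA (fam : List (List (List Int))) : List (Nat × Nat) :=
  fam.map (fun m => (m.length, ((PySem.List.pyGet? m 0).getD []).length))

-- the index loop 'for i in range(len(mat_dims)-1): if dims[i][1] != dims[i+1][0]: return False'
def pvScanA : List (Nat × Nat) → Bool
  | a :: b :: rest => if a.2 ≠ b.1 then false else pvScanA (b :: rest)
  | _ => true

def are_compatible (fam : List (List (List Int))) : Bool :=
  pvScanA (pvDimsA fam)

-- ===== PORT B =====
-- single pass, prev_cols : Option Nat is the sentinel accumulator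
def pvLoopB (prev : Option Nat) : List (List (List Int)) → Bool
  | [] => true
  | m :: rest =>
    if prev.isSome ∧ prev ≠ some m.length then false
    else pvLoopB (some ((PySem.List.pyGet? m 0).getD []).length) rest

def are_compatible_alt (fam : List (List (List Int))) : Bool :=
  pvLoopB none fam

-- ===== PRECONDITION & SPEC =====
-- Pre_ excludes exactly the inputs where Python A raises IndexError: a family
-- containing an empty matrix (len(m[0]) on m = []).
def Pre_are_compatible (fam : List (List (List Int))) : Prop :=
  ∀ m ∈ fam, m ≠ []
instance (fam : List (List (List Int))) : Decidable (Pre_are_compatible fam) := by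
  unfold Pre_are_compatible; infer_instance
def pvWitness_are_compatible : List (List (List Int)) := [[[1, 2]], [[3], [4]]]

def Spec_are_compatible (fam : List (List (List Int))) (out : Bool) : Prop := out = are_compatible_alt fam
instance (fam : List (List (List Int))) (out : Bool) : Decidable (Spec_are_compatible fam out) := by unfold Spec_are_compatible; infer_instance

-- ===== CLAIM (what is proved, stated in full; the proofs are below) =====
def Claim_equal_are_compatible : Prop := ∀ (fam : List (List (List Int))), Dom_are_compatible fam → Pre_are_compatible fam → Spec_are_compatible fam (are_compatible fam)

-- ===== LEMMAS AND PROOFS =====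

-- invariant: after the first matrix, the A-scan over the dims list equals the
-- B-loop carrying the previous column count c0 (the row count r0 is never read again)
theorem pvScan_eq_loop (fam : List (List (List Int))) (r0 c0 : Nat) :
    pvScanA ((r0, c0) :: pvDimsA fam) = pvLoopB (some c0) fam := by
  induction fam generalizing r0 c0 with
  | nil => rfl
  | cons m rest ih =>
    simp only [pvDimsA, List.map_cons, pvScanA, pvLoopB]
    by_cases h : c0 = m.length
    · simpa [h] using ih m.length ((PySem.List.pyGet? m 0).getD []).length
    · simp [h]

-- ===== VERDICT (by name: the statement is the Claim_ definition above) =====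
theorem are_compatible_spec : Claim_equal_are_compatible := by
  intro fam _ _
  unfold Spec_are_compatible are_compatible are_compatible_alt
  cases fam with
  | nil => rfl
  | cons m rest =>
    simpa [pvDimsA, pvLoopB] using
      pvScan_eq_loop rest m.length ((PySem.List.pyGet? m 0).getD []).length
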